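-- pv_equiv track=rewrite | github.com/SamProkopchuk/coding-problems | kattis/hanjie/solution.py | is_partial
-- ===== SOURCE A (Python) =====
-- def is_partial(clue, row_or_col):
--     consec = 0
--     cur = []
--     for x in row_or_col:
--         if x == 1:
--             consec += 1
--         elif consec > 0:
--             cur.append(consec)
--             consec = 0
--     if x == 1:
--         cur.append(consec)
--     return len(cur) <= len(clue) and all(i <= j for i, j in zip(cur, clue))
-- ===== SOURCE B (Python) =====
-- def _count_ones_from(xs, i):
--     # length of the run of 1s starting at position i
--     c = 0
--     while i + c < len(xs) and xs[i + c] == 1: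
--         c += 1
--     return c
--
--
-- def is_partial(clue, row_or_col):
--     # Extract the maximal runs of 1s by jumping over each whole leading run.
--     runs = []
--     i = 0
--     while i < len(row_or_col):
--         if row_or_col[i] == 1:
--             k = _count_ones_from(row_or_col, i)
--             runs.append(k)
--             i += k
--         else:
--             i += 1
--     return len(runs) <= len(clue) and all(r <= c for r, c in zip(runs, clue))
-- ===== Notes on version B (the rewrite author's own statement) =====
-- stated objective: alternative
-- what changed: B extracts the maximal runs of 1s with a nested scan that counts a whole run and jumps past it, instead of A's per-element counter with a post-loop fixup reading the leftover loop variable; B also returns a value on an empty line where A raises.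
-- outside the precondition, e.g. on is_partial([], []): A raises UnboundLocalError, B returns True
-- crash fix: On an empty row_or_col A raises NameError/UnboundLocalError (the loop variable x is unbound at the post-loop check); B returns True (no runs yet, so any prefix is consistent). — e.g. on is_partial([], []): A raises UnboundLocalError, B returns true
import Mathlib
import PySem

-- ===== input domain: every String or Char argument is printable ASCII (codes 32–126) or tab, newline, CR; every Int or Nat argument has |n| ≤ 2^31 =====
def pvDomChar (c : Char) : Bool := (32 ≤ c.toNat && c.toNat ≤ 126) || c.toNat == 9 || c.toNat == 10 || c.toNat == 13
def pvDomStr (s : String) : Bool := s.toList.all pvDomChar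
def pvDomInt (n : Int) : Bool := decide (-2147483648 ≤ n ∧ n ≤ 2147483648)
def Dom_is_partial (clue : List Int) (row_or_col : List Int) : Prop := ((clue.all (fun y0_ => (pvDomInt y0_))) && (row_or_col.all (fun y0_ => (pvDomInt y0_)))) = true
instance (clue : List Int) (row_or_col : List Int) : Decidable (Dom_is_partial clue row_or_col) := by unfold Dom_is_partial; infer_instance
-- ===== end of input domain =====

-- B extracts the runs of 1s by repeatedly splitting off the whole leading run (prefix-count + drop)
-- instead of A's per-element counter with a post-loop fixup; same result on every nonempty line.

-- the identical final `return` line of both Pythons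
def pvCheck (clue cur : List Int) : Bool :=
  decide (cur.length ≤ clue.length) && (cur.zip clue).all (fun p => decide (p.1 ≤ p.2))

-- ===== PORT A =====
-- A's loop body: consec/cur updated per element.
def pvStepA (s : Int × List Int) (x : Int) : Int × List Int :=
  if x = 1 then (s.1 + 1, s.2)
  else if s.1 > 0 then ((0 : Int), s.2 ++ [s.1])
  else s

-- Python's post-loop `x` is the last element; on an empty list A raises NameError,
-- excluded by Pre_is_partial, so getLastD's default is never relevant there.
def pvRunsA (xs : List Int) : List Int :=
  let st := xs.foldl pvStepA ((0 : Int), ([] : List Int))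
  if xs.getLastD 0 = 1 then st.2 ++ [st.1] else st.2

def is_partial (clue : List Int) (row_or_col : List Int) : Bool :=
  pvCheck clue (pvRunsA row_or_col)

-- ===== PORT B =====
-- Source B's _count_ones_from: count the 1s from the current position (here: from the head of the suffix).
def pvCountPrefixOnes : List Int → Nat
  | [] => 0
  | x :: xs => if x = 1 then pvCountPrefixOnes xs + 1 else 0

-- Source B's while loop; Source B's position index i is represented by the remaining suffix (drop i),
-- and fuel = initial length makes the loop total (each iteration advances by ≥ 1 element).
def pvSplitLoop : Nat → List Int → List Int → List Int
  | 0, _, runs => runs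
  | _ + 1, [], runs => runs
  | fuel + 1, x :: t, runs =>
    if x = 1 then
      pvSplitLoop fuel ((x :: t).drop (pvCountPrefixOnes (x :: t)))
        (runs ++ [(pvCountPrefixOnes (x :: t) : Int)])
    else pvSplitLoop fuel t runs

def is_partial_alt (clue : List Int) (row_or_col : List Int) : Bool :=
  pvCheck clue (pvSplitLoop row_or_col.length row_or_col [])

-- ===== PRECONDITION & SPEC =====
-- Pre_ excludes only the empty row_or_col, on which A raises NameError (loop variable unbound).
def Pre_is_partial (clue : List Int) (row_or_col : List Int) : Prop := row_or_col ≠ []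
instance (clue : List Int) (row_or_col : List Int) : Decidable (Pre_is_partial clue row_or_col) := by unfold Pre_is_partial; infer_instance

def pvWitness_is_partial : List Int × List Int := ([1], [1])

-- On an empty row_or_col A raises NameError; B returns True (no runs, so any prefix is consistent).
def Raises_is_partial (clue : List Int) (row_or_col : List Int) : Prop := row_or_col = []
instance (clue : List Int) (row_or_col : List Int) : Decidable (Raises_is_partial clue row_or_col) := by unfold Raises_is_partial; infer_instance
def pvRaiseWitness_is_partial : List Int × List Int := ([], [])
def pvRaiseWitnessOut_is_partial : Bool := true

def Spec_is_partial (clue : List Int) (row_or_col : List Int) (out : Bool) : Prop := out = is_partial_alt clue row_or_col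
instance (clue : List Int) (row_or_col : List Int) (out : Bool) : Decidable (Spec_is_partial clue row_or_col out) := by unfold Spec_is_partial; infer_instance

-- ===== CLAIM (what is proved, stated in full; the proofs are below) =====
def Claim_equal_is_partial : Prop := ∀ (clue : List Int) (row_or_col : List Int), Dom_is_partial clue row_or_col → Pre_is_partial clue row_or_col → Spec_is_partial clue row_or_col (is_partial clue row_or_col)

def Claim_raises_is_partial : Prop := (∀ (clue : List Int) (row_or_col : List Int), Dom_is_partial clue row_or_col → Raises_is_partial clue row_or_col → ¬ Pre_is_partial clue row_or_col) ∧ (Dom_is_partial (pvRaiseWitness_is_partial.1) (pvRaiseWitness_is_partial.2) ∧ Raises_is_partial (pvRaiseWitness_is_partial.1) (pvRaiseWitness_is_partial.2) ∧ is_partial_alt (pvRaiseWitness_is_partial.1) (pvRaiseWitness_is_partial.2) = pvRaiseWitnessOut_is_partial)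

-- ===== LEMMAS AND PROOFS =====

-- A's run list with a general accumulator (proof-only helper; pvRunsA xs = pvAfin [] xs by rfl).
def pvAfin (cur : List Int) (xs : List Int) : List Int :=
  let st := List.foldl pvStepA ((0 : Int), cur) xs
  if xs.getLastD 0 = 1 then st.2 ++ [st.1] else st.2

lemma pvCountPrefixOnes_pos (t : List Int) : 1 ≤ pvCountPrefixOnes (1 :: t) := by
  simp [pvCountPrefixOnes]

lemma pvTake_count (xs : List Int) :
    xs.take (pvCountPrefixOnes xs) = List.replicate (pvCountPrefixOnes xs) 1 := by
  induction xs with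
  | nil => simp [pvCountPrefixOnes]
  | cons x t ih =>
    by_cases h : x = 1
    · simp [pvCountPrefixOnes, h, List.replicate_succ, ih]
    · simp [pvCountPrefixOnes, h]

lemma pvDrop_head_ne_one (xs : List Int) (y : Int) (ys : List Int)
    (h : xs.drop (pvCountPrefixOnes xs) = y :: ys) : y ≠ 1 := by
  induction xs generalizing ys with
  | nil => simp [pvCountPrefixOnes] at h
  | cons x t ih =>
    by_cases hx : x = 1
    · have h' : t.drop (pvCountPrefixOnes t) = y :: ys := by
        simpa [pvCountPrefixOnes, hx] using h
      exact ih _ h'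
    · have h' : x :: t = y :: ys := by simpa [pvCountPrefixOnes, hx] using h
      intro hy
      injection h' with h1 _
      exact hx (h1.trans hy)

lemma pvFoldl_ones (k : Nat) (c : Int) (cur : List Int) :
    List.foldl pvStepA (c, cur) (List.replicate k 1) = (c + k, cur) := by
  induction k generalizing c with
  | zero => simp
  | succ n ih =>
    rw [List.replicate_succ, List.foldl_cons]
    have hstep : pvStepA (c, cur) 1 = (c + 1, cur) := by simp [pvStepA]
    rw [hstep, ih]
    congr 1
    push_cast
    ring

lemma pvGetLastD_cons_ne (x d : Int) (L : List Int) (h : L ≠ []) :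
    (x :: L).getLastD d = L.getLastD d := by
  cases L with
  | nil => exact absurd rfl h
  | cons a b => simp [List.getLastD_cons]

lemma pvGetLastD_append_right (l₁ l₂ : List Int) (d : Int) (h : l₂ ≠ []) :
    (l₁ ++ l₂).getLastD d = l₂.getLastD d := by
  induction l₁ with
  | nil => simp
  | cons p q ih =>
    rw [List.cons_append, pvGetLastD_cons_ne _ _ _ (by simp [h]), ih]

lemma pvGetLastD_replicate_one (k : Nat) (h : 1 ≤ k) :
    (List.replicate k (1 : Int)).getLastD 0 = 1 := by
  induction k with
  | zero => omega
  | succ n ih =>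
    rw [List.replicate_succ]
    cases n with
    | zero => simp
    | succ m =>
      rw [pvGetLastD_cons_ne _ _ _ (by simp)]
      exact ih (by omega)

lemma pvSplitLoop_nil (f : Nat) (r : List Int) : pvSplitLoop f [] r = r := by
  cases f <;> rfl

lemma pvG : ∀ (fuel : Nat) (xs cur : List Int), xs.length ≤ fuel → xs ≠ [] →
    pvAfin cur xs = pvSplitLoop fuel xs cur := by
  intro fuel
  induction fuel with
  | zero =>
    intro xs cur hl hne
    cases xs with
    | nil => exact absurd rfl hne
    | cons a b => simp at hl
  | succ n ih =>
    intro xs cur hl hne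
    cases xs with
    | nil => exact absurd rfl hne
    | cons x t =>
      by_cases hx : x = 1
      · subst hx
        have hk1 : 1 ≤ pvCountPrefixOnes (1 :: t) := pvCountPrefixOnes_pos t
        have hsplit : (1 : Int) :: t
            = List.replicate (pvCountPrefixOnes (1 :: t)) 1
              ++ (1 :: t).drop (pvCountPrefixOnes (1 :: t)) := by
          conv_lhs => rw [← List.take_append_drop (pvCountPrefixOnes (1 :: t)) (1 :: t)]
          rw [pvTake_count]
        have hloop : pvSplitLoop (n + 1) (1 :: t) cur
            = pvSplitLoop n ((1 :: t).drop (pvCountPrefixOnes (1 :: t)))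
                (cur ++ [(pvCountPrefixOnes (1 :: t) : Int)]) := by
          rw [pvSplitLoop]
          simp
        cases hrest : (1 :: t).drop (pvCountPrefixOnes (1 :: t)) with
        | nil =>
          have hxs : (1 : Int) :: t = List.replicate (pvCountPrefixOnes (1 :: t)) 1 := by
            conv_lhs => rw [hsplit, hrest]
            rw [List.append_nil]
          rw [hloop, hrest, pvSplitLoop_nil, pvAfin]
          conv_lhs => rw [hxs, pvFoldl_ones, pvGetLastD_replicate_one _ hk1]
          simp
        | cons y ys =>
          have hy : y ≠ 1 := pvDrop_head_ne_one _ _ _ hrest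
          have hkpos : (0 : Int) < (pvCountPrefixOnes (1 :: t) : Int) := by exact_mod_cast hk1
          have hlast : ((1 : Int) :: t).getLastD 0 = (y :: ys).getLastD 0 := by
            conv_lhs => rw [hsplit, hrest]
            exact pvGetLastD_append_right _ _ _ (by simp)
          have hfold : List.foldl pvStepA ((0 : Int), cur) (1 :: t)
              = List.foldl pvStepA ((0 : Int), cur ++ [(pvCountPrefixOnes (1 :: t) : Int)]) (y :: ys) := by
            conv_lhs => rw [hsplit, hrest]
            rw [List.foldl_append, pvFoldl_ones, List.foldl_cons, List.foldl_cons]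
            congr 1
            simp [pvStepA, hy]
            omega
          have hafin : pvAfin cur ((1 : Int) :: t) = pvAfin (cur ++ [(pvCountPrefixOnes (1 :: t) : Int)]) (y :: ys) := by
            rw [pvAfin, pvAfin, hfold, hlast]
          have hlen : (y :: ys).length ≤ n := by
            have h2 := congrArg List.length hsplit
            rw [hrest] at h2
            simp only [List.length_cons, List.length_append, List.length_replicate] at h2
            have hl' : t.length + 1 ≤ n + 1 := by simpa using hl
            simp only [List.length_cons]
            omega
          rw [hafin, hloop, hrest]
          exact ih (y :: ys) _ hlen (by simp)
      · have hloop : pvSplitLoop (n + 1) (x :: t) cur = pvSplitLoop n t cur := by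
          rw [pvSplitLoop]
          simp [hx]
        have hstep : pvStepA ((0 : Int), cur) x = ((0 : Int), cur) := by
          simp [pvStepA, hx]
        cases t with
        | nil =>
          rw [hloop, pvSplitLoop_nil, pvAfin]
          simp [hstep, hx]
        | cons a b =>
          have hafin : pvAfin cur (x :: a :: b) = pvAfin cur (a :: b) := by
            rw [pvAfin, pvAfin, List.foldl_cons, hstep,
              pvGetLastD_cons_ne _ _ _ (by simp)]
          rw [hafin, hloop]
          exact ih (a :: b) cur (by simp at hl ⊢; omega) (by simp)

-- ===== VERDICT (by name: the statement is the Claim_ definition above) =====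
theorem is_partial_spec : Claim_equal_is_partial := by
  intro clue row_or_col _ hpre
  unfold Spec_is_partial is_partial is_partial_alt
  have h : pvRunsA row_or_col = pvSplitLoop row_or_col.length row_or_col [] :=
    pvG row_or_col.length row_or_col [] le_rfl hpre
  rw [h]

def is_partial_raises : Claim_raises_is_partial := by
  unfold Claim_raises_is_partial
  exact ⟨fun _ _ _ h => by simpa [Pre_is_partial] using h, by decide⟩
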